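-- pv_equiv track=rewrite | github.com/Kapok-uii/worker-allocation | worker-assign/DGWO/src/seek_critical_node.py | convert_jsp_order_to_edges
-- ===== SOURCE A (Python) =====
-- def convert_jsp_order_to_edges(node_machine, product_num, dur_num):
--     all_order_edge = []
--
--     for proith in range(product_num):
--         for durith in range(dur_num):
--             order_edge = [taski for taski in node_machine if taski[0][0] == proith and taski[0][1] == durith]
--             for ith in range(len(order_edge) - 1):
--                 all_order_edge.append((order_edge[ith][0], order_edge[ith + 1][0], order_edge[ith][1]))
--
--     return all_order_edge
-- ===== SOURCE B (Python) =====
-- def convert_jsp_order_to_edges(node_machine, product_num, dur_num):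
--     # Group tasks once by their (product, duration) key, then emit consecutive-pair
--     # edges per group in (product, duration) order: O(N + product_num*dur_num).
--     groups = {}
--     for taski in node_machine:
--         groups.setdefault(taski[0], []).append(taski)
--     all_order_edge = []
--     for proith in range(product_num):
--         for durith in range(dur_num):
--             g = groups.get((proith, durith), [])
--             for a, b in zip(g, g[1:]):
--                 all_order_edge.append((a[0], b[0], a[1]))
--     return all_order_edge
-- ===== Notes on version B (the rewrite author's own statement) =====
-- stated objective: faster
-- what changed: Replaces the per-(product,duration) rescan of the whole task list with a single-pass dict grouping keyed by (product,duration), then pairs consecutive group members with zip instead of an index loop.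
import Mathlib
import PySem

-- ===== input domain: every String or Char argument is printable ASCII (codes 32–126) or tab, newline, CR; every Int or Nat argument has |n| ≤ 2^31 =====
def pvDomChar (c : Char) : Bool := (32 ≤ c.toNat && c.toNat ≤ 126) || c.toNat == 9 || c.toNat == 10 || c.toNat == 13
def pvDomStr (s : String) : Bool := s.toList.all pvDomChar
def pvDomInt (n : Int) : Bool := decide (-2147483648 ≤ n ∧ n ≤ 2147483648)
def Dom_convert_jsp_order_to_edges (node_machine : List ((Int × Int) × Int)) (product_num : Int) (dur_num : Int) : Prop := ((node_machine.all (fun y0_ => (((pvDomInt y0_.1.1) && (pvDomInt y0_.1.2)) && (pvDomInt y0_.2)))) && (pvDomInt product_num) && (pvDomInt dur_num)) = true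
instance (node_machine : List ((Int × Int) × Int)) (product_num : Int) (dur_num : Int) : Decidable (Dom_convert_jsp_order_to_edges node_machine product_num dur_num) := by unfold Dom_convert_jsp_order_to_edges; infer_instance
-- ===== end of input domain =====

-- B groups the tasks once into a dict keyed by (product, duration) and pairs
-- consecutive group members with zip, instead of rescanning the whole list per key (objective: faster).


-- ===== PORT A =====
def convert_jsp_order_to_edges (node_machine : List ((Int × Int) × Int)) (product_num : Int) (dur_num : Int) : List ((Int × Int) × (Int × Int) × Int) :=
  (PySem.List.pyRange 0 product_num 1).foldl (fun acc1 proith =>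
    (PySem.List.pyRange 0 dur_num 1).foldl (fun acc2 durith =>
      let order_edge := node_machine.filter (fun taski => taski.1.1 == proith && taski.1.2 == durith)
      (PySem.List.pyRange 0 ((order_edge.length : Int) - 1) 1).foldl (fun acc3 ith =>
        acc3 ++ [((PySem.List.pyGetD order_edge ith ((0, 0), 0)).1,
                  (PySem.List.pyGetD order_edge (ith + 1) ((0, 0), 0)).1,
                  (PySem.List.pyGetD order_edge ith ((0, 0), 0)).2)]) acc2) acc1) []

-- ===== PORT B =====
def convert_jsp_order_to_edges_alt (node_machine : List ((Int × Int) × Int)) (product_num : Int) (dur_num : Int) : List ((Int × Int) × (Int × Int) × Int) :=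
  let groups : PySem.Dict (Int × Int) (List ((Int × Int) × Int)) :=
    node_machine.foldl (fun d taski => d.modify taski.1 [] (· ++ [taski])) PySem.Dict.empty
  (PySem.List.pyRange 0 product_num 1).foldl (fun acc1 proith =>
    (PySem.List.pyRange 0 dur_num 1).foldl (fun acc2 durith =>
      let g := groups.getD (proith, durith) []
      (g.zip g.tail).foldl (fun acc3 ab =>
        acc3 ++ [(ab.1.1, ab.2.1, ab.1.2)]) acc2) acc1) []

-- ===== PRECONDITION & SPEC =====
def Spec_convert_jsp_order_to_edges (node_machine : List ((Int × Int) × Int)) (product_num : Int) (dur_num : Int) (out : List ((Int × Int) × (Int × Int) × Int)) : Prop := out = convert_jsp_order_to_edges_alt node_machine product_num dur_num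
instance (node_machine : List ((Int × Int) × Int)) (product_num : Int) (dur_num : Int) (out : List ((Int × Int) × (Int × Int) × Int)) : Decidable (Spec_convert_jsp_order_to_edges node_machine product_num dur_num out) := by unfold Spec_convert_jsp_order_to_edges; infer_instance

-- ===== CLAIM (what is proved, stated in full; the proofs are below) =====
def Claim_equal_convert_jsp_order_to_edges : Prop := ∀ (node_machine : List ((Int × Int) × Int)) (product_num : Int) (dur_num : Int), Dom_convert_jsp_order_to_edges node_machine product_num dur_num → Spec_convert_jsp_order_to_edges node_machine product_num dur_num (convert_jsp_order_to_edges node_machine product_num dur_num)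

-- ===== LEMMAS AND PROOFS =====

-- B's dict group at key (p, q) is exactly A's filter of the task list.
theorem pv_group_eq (nm : List ((Int × Int) × Int)) (p q : Int) :
    (nm.foldl (fun d taski => d.modify taski.1 [] (· ++ [taski])) PySem.Dict.empty).getD (p, q) [] =
      nm.filter (fun taski => taski.1.1 == p && taski.1.2 == q) := by
  have h := PySem.Dict.getD_foldl_modify_append
    (l := nm.map (fun t => (t.1, t))) (d := (PySem.Dict.empty : PySem.Dict (Int × Int) (List ((Int × Int) × Int)))) (c := (p, q))
  rw [List.foldl_map] at h
  rw [h]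
  simp only [PySem.Dict.getD_empty, List.nil_append, List.filter_map, List.map_map]
  have hp : ((fun pr : (Int × Int) × ((Int × Int) × Int) => pr.1 == (p, q)) ∘ (fun t : (Int × Int) × Int => (t.1, t)))
      = fun t : (Int × Int) × Int => (t.1.1 == p && t.1.2 == q) := by
    funext t
    obtain ⟨⟨a, b⟩, m⟩ := t
    rfl
  rw [hp]
  exact List.map_id _

-- The index loop over range(len(l)-1) reads the same pairs as zip(l, l[1:]).
theorem pv_pairs_eq (l : List ((Int × Int) × Int)) :
    ((PySem.List.pyRange 0 ((l.length : Int) - 1) 1).map (fun ith =>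
        ((PySem.List.pyGetD l ith ((0, 0), 0)).1,
         (PySem.List.pyGetD l (ith + 1) ((0, 0), 0)).1,
         (PySem.List.pyGetD l ith ((0, 0), 0)).2))) =
      (l.zip l.tail).map (fun ab => (ab.1.1, ab.2.1, ab.1.2)) := by
  rw [PySem.List.pyRange_one, List.map_map]
  apply List.ext_getElem
  · simp only [List.length_map, List.length_range, List.length_zip, List.length_tail]
    omega
  · intro k hk1 hk2
    have hk : k < l.length - 1 := by
      simp only [List.length_map, List.length_range] at hk1
      omega
    simp only [List.getElem_map, List.getElem_range, Function.comp_apply, zero_add]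
    rw [show ((k : Int) + 1) = (((k + 1 : Nat)) : Int) by push_cast; ring]
    rw [PySem.List.pyGetD_eq_getElem l (i := (k : Int)) ((0, 0), 0) (by omega) (by omega),
        PySem.List.pyGetD_eq_getElem l (i := ((k + 1 : Nat) : Int)) ((0, 0), 0) (by omega) (by omega)]
    simp [List.getElem_zip, List.getElem_tail]

-- one (product, duration) cell: A's index loop equals B's zip loop on the corresponding group
theorem pv_cell_eq (nm : List ((Int × Int) × Int)) (p q : Int)
    (acc : List ((Int × Int) × (Int × Int) × Int)) :
    (PySem.List.pyRange 0 (((nm.filter (fun taski => taski.1.1 == p && taski.1.2 == q)).length : Int) - 1) 1).foldl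
      (fun acc3 ith =>
        acc3 ++ [((PySem.List.pyGetD (nm.filter (fun taski => taski.1.1 == p && taski.1.2 == q)) ith ((0, 0), 0)).1,
                  (PySem.List.pyGetD (nm.filter (fun taski => taski.1.1 == p && taski.1.2 == q)) (ith + 1) ((0, 0), 0)).1,
                  (PySem.List.pyGetD (nm.filter (fun taski => taski.1.1 == p && taski.1.2 == q)) ith ((0, 0), 0)).2)]) acc =
    (((nm.foldl (fun d taski => d.modify taski.1 [] (· ++ [taski])) PySem.Dict.empty).getD (p, q) []).zip
      ((nm.foldl (fun d taski => d.modify taski.1 [] (· ++ [taski])) PySem.Dict.empty).getD (p, q) []).tail).foldl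
      (fun acc3 ab => acc3 ++ [(ab.1.1, ab.2.1, ab.1.2)]) acc := by
  rw [PySem.List.foldl_append_singleton_eq_map, PySem.List.foldl_append_singleton_eq_map,
      pv_group_eq, pv_pairs_eq]

-- ===== VERDICT (by name: the statement is the Claim_ definition above) =====
theorem convert_jsp_order_to_edges_spec : Claim_equal_convert_jsp_order_to_edges := by
  intro nm pn dn _
  unfold Spec_convert_jsp_order_to_edges convert_jsp_order_to_edges convert_jsp_order_to_edges_alt
  dsimp only
  apply PySem.List.foldl_congr_mem
  intro acc1 p _
  apply PySem.List.foldl_congr_mem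
  intro acc2 q _
  exact pv_cell_eq nm p q acc2
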